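-- pv_equiv track=rewrite | github.com/ajones239/PySourceCodeSec | labeller/features.py | num_of_invocations
-- ===== SOURCE A (Python) =====
-- def num_of_invocations(line):
--     inv = 0
--     for i in range(len(line)):
--         if line[i] == '(':
--             if i == 0:
--                 continue
--             if line[i-1] != ' ' and line[i-1] != '=':
--                 inv += 1
--     return inv
-- ===== SOURCE B (Python) =====
-- def num_of_invocations(line):
--     # Split on '(' and classify each boundary by the last character of the
--     # fragment before it; the first fragment being empty means the '(' was
--     # at position 0 (not counted), later empty fragments mean the previous
--     # character was '(' itself (counted).
--     parts = line.split('(')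
--     if len(parts) == 1:
--         return 0
--     first = parts[0]
--     inv = 1 if first and first[-1] != ' ' and first[-1] != '=' else 0
--     for part in parts[1:-1]:
--         if not part or (part[-1] != ' ' and part[-1] != '='):
--             inv += 1
--     return inv
-- ===== Notes on version B (the rewrite author's own statement) =====
-- stated objective: faster
-- what changed: B splits the line once on the open-parenthesis separator and classifies each boundary by the last character of the preceding fragment (an empty first fragment means the parenthesis was at position 0 and is skipped; a later empty fragment means the previous character was itself a parenthesis), replacing A's per-index Python loop.
import Mathlib
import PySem

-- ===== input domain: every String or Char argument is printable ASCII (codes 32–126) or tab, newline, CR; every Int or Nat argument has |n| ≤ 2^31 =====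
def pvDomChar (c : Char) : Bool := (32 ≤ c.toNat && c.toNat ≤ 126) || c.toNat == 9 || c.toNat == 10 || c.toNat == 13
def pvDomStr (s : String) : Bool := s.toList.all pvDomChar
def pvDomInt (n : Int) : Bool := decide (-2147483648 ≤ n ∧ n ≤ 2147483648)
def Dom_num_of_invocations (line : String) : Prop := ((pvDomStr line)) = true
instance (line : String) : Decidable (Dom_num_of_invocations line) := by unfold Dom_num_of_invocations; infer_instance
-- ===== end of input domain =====

-- B splits the line on '(' and classifies each boundary by the last character of the preceding
-- fragment, instead of scanning character indices: a split-based decomposition, measurably faster in CPython (split runs in C).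

-- ===== PORT A =====
def num_of_invocations (line : String) : Int :=
  (PySem.List.pyRange 0 (line.toList.length : Int) 1).foldl (fun inv i =>
    if PySem.List.pyGetD line.toList i ' ' = '(' then
      if i = 0 then inv
      else if PySem.List.pyGetD line.toList (i - 1) ' ' ≠ ' ' ∧ PySem.List.pyGetD line.toList (i - 1) ' ' ≠ '=' then
        inv + 1
      else inv
    else inv) 0

-- ===== PORT B =====
-- line.split('(') is ported as List.splitOn '(' (Python str.split with a one-char separator
-- is exactly List.splitOn on the character list).
def num_of_invocations_alt (line : String) : Int :=
  let parts := List.splitOn '(' line.toList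
  if parts.length = 1 then 0
  else
    let first := parts.headD []
    let inv : Int :=
      if first ≠ [] ∧ PySem.List.pyGetD first (-1) ' ' ≠ ' ' ∧ PySem.List.pyGetD first (-1) ' ' ≠ '=' then 1 else 0
    (PySem.List.slice parts (some 1) (some (-1))).foldl
      (fun inv part =>
        if part = [] ∨ (PySem.List.pyGetD part (-1) ' ' ≠ ' ' ∧ PySem.List.pyGetD part (-1) ' ' ≠ '=') then
          inv + 1
        else inv) inv

-- ===== PRECONDITION & SPEC =====
def Spec_num_of_invocations (line : String) (out : Int) : Prop := out = num_of_invocations_alt line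
instance (line : String) (out : Int) : Decidable (Spec_num_of_invocations line out) := by unfold Spec_num_of_invocations; infer_instance

-- ===== CLAIM (what is proved, stated in full; the proofs are below) =====
def Claim_equal_num_of_invocations : Prop := ∀ (line : String), Dom_num_of_invocations line → Spec_num_of_invocations line (num_of_invocations line)

-- ===== LEMMAS AND PROOFS =====

-- 'the previous character allows counting a following "("'
def pvGood : Option Char → Bool
  | some c => c ≠ ' ' && c ≠ '='
  | none => false

-- reference spec: scan carrying the previous character
def pvF : Option Char → List Char → Int
  | _, [] => 0
  | prev, c :: rest => (if c = '(' && pvGood prev then 1 else 0) + pvF (some c) rest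

-- reference value of B's split-based count: one summand per boundary between fragments
def pvB : Option Char → List (List Char) → Int
  | _, [] => 0
  | prev, q :: rest =>
    match rest with
    | [] => 0
    | _ :: _ => (if pvGood (q.getLast?.or prev) then 1 else 0) + pvB (some '(') rest

-- A's fold over the first n indices equals the pair fold over the zipped adjacent pairs
theorem pv_key (cs : List Char) (n : Nat) (hn : n ≤ cs.length) :
    (PySem.List.pyRange 0 (n : Int) 1).foldl (fun inv i =>
      if PySem.List.pyGetD cs i ' ' = '(' then
        if i = 0 then inv
        else if PySem.List.pyGetD cs (i - 1) ' ' ≠ ' ' ∧ PySem.List.pyGetD cs (i - 1) ' ' ≠ '=' then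
          inv + 1
        else inv
      else inv) (0 : Int)
    = ((cs.zip cs.tail).take (n - 1)).foldl (fun inv pc =>
        if pc.2 = '(' ∧ pc.1 ≠ ' ' ∧ pc.1 ≠ '=' then inv + 1 else inv) (0 : Int) := by
  induction n with
  | zero => simp [PySem.List.pyRange_one_eq_nil]
  | succ m ih =>
    have hm : m ≤ cs.length := Nat.le_of_succ_le hn
    have hsplit : PySem.List.pyRange 0 ((m + 1 : Nat) : Int) 1
        = PySem.List.pyRange 0 (m : Nat) 1 ++ [(m : Int)] := by
      push_cast
      exact PySem.List.pyRange_one_succ_right (by positivity)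
    rw [hsplit, List.foldl_append, ih hm]
    rcases m with _ | k
    · simp
    · have hk1 : k + 1 < cs.length := hn
      have hklt : k < (cs.zip cs.tail).length := by
        rcases cs with _ | ⟨c, cs'⟩
        · simp at hk1
        · simpa [List.length_zip] using Nat.lt_of_succ_lt_succ hk1
      have hpair : (cs.zip cs.tail)[k] = (cs[k + 1 - 1]'(by omega), cs[k + 1]'hk1) := by
        rcases cs with _ | ⟨c, cs'⟩
        · simp at hk1
        · simp [List.getElem_zip]
      have htake : (cs.zip cs.tail).take (k + 1 + 1 - 1)
          = (cs.zip cs.tail).take (k + 1 - 1) ++ [(cs.zip cs.tail)[k]] := by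
        simpa using List.take_succ_eq_append_getElem hklt
      rw [htake, List.foldl_append]
      simp only [List.foldl_cons, List.foldl_nil, hpair]
      have hA1 : PySem.List.pyGetD cs ((k + 1 : Nat) : Int) ' ' = cs[k + 1]'hk1 := by
        rw [PySem.List.pyGetD_eq_getElem _ _ (by omega) (by exact_mod_cast hk1)]
        simp
      have hA2 : PySem.List.pyGetD cs (((k + 1 : Nat) : Int) - 1) ' ' = cs[k]'(by omega) := by
        rw [PySem.List.pyGetD_eq_getElem _ _ (by push_cast; omega)
          (by push_cast; omega)]
        congr 1
        omega
      rw [hA1, hA2]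
      by_cases h1 : cs[k + 1]'hk1 = '(' <;> by_cases h2 : cs[k]'(by omega) ≠ ' ' ∧ cs[k]'(by omega) ≠ '=' <;>
        simp [h1, h2]
      all_goals omega

-- the pair fold computes pvF with the head as carried previous character
theorem pv_zip_f (cs : List Char) : ∀ (p : Char) (a : Int),
    ((p :: cs).zip cs).foldl (fun inv pc =>
        if pc.2 = '(' ∧ pc.1 ≠ ' ' ∧ pc.1 ≠ '=' then inv + 1 else inv) a
      = a + pvF (some p) cs := by
  induction cs with
  | nil => simp [pvF]
  | cons c rest ih =>
    intro p a
    simp only [List.zip_cons_cons, List.foldl_cons]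
    rw [ih c]
    by_cases h1 : c = '(' <;> by_cases h2 : p ≠ ' ' ∧ p ≠ '=' <;>
      simp [pvF, pvGood, h1, h2] <;> omega

theorem pv_f_eq_pair (cs : List Char) :
    (cs.zip cs.tail).foldl (fun inv pc =>
        if pc.2 = '(' ∧ pc.1 ≠ ' ' ∧ pc.1 ≠ '=' then inv + 1 else inv) 0 = pvF none cs := by
  cases cs with
  | nil => simp [pvF]
  | cons c rest =>
    simp only [List.tail_cons]
    rw [pv_zip_f rest c 0]
    simp [pvF, pvGood]

-- equation lemmas for pvB
theorem pvB_single (prev : Option Char) (q : List Char) : pvB prev [q] = 0 := rfl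

theorem pvB_cons_cons (prev : Option Char) (q q2 : List Char) (rs : List (List Char)) :
    pvB prev (q :: q2 :: rs)
      = (if pvGood (q.getLast?.or prev) then 1 else 0) + pvB (some '(') (q2 :: rs) := rfl

theorem pv_or_some_or (a : Option Char) (c : Char) (prev : Option Char) :
    (a.or (some c)).or prev = a.or (some c) := by
  cases a <;> simp

-- main bridge: the scan spec equals the per-boundary sum over splitOnP
theorem pv_split_key (cs : List Char) : ∀ (prev : Option Char),
    pvF prev cs = pvB prev (List.splitOnP (· == '(') cs) := by
  induction cs with
  | nil => intro prev; simp [pvF, List.splitOnP_nil, pvB]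
  | cons c rest ih =>
    intro prev
    rw [List.splitOnP_cons]
    obtain ⟨q, P', hP⟩ : ∃ q P', List.splitOnP (· == '(') rest = q :: P' := by
      cases h : List.splitOnP (· == '(') rest with
      | nil => exact absurd h (List.splitOnP_ne_nil _ _)
      | cons q P' => exact ⟨q, P', rfl⟩
    by_cases hc : c = '('
    · subst hc
      rw [if_pos (by simp), hP]
      have hrec := ih (some '(')
      rw [hP] at hrec
      rw [pvB_cons_cons]
      simp only [pvF, ← hrec, List.getLast?_nil, Option.or]
      by_cases hg : pvGood prev = true <;> simp [hg]
    · have hcb : ((c == '(') = false) := by simpa using hc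
      rw [if_neg (by simp [hcb]), hP, List.modifyHead_cons]
      have hrec := ih (some c)
      rw [hP] at hrec
      have hF : pvF prev (c :: rest) = pvF (some c) rest := by
        simp [pvF, hc]
      rw [hF, hrec]
      cases P' with
      | nil => rw [pvB_single, pvB_single]
      | cons q2 P'' =>
        rw [pvB_cons_cons, pvB_cons_cons]
        have hlast : (c :: q).getLast? = q.getLast?.or (some c) := by
          cases q with
          | nil => simp
          | cons x xs =>
            rw [List.getLast?_cons_cons]
            cases hxy : (x :: xs).getLast? with
            | none => simp at hxy
            | some y => rfl
        rw [hlast, pv_or_some_or]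

-- B's fold over the middle fragments computes pvB with previous character '('
theorem pv_b_fold (rest : List (List Char)) : ∀ (a : Int), rest ≠ [] →
    rest.dropLast.foldl
      (fun inv part =>
        if part = [] ∨ (PySem.List.pyGetD part (-1) ' ' ≠ ' ' ∧ PySem.List.pyGetD part (-1) ' ' ≠ '=') then
          inv + 1
        else inv) a
      = a + pvB (some '(') rest := by
  induction rest with
  | nil => intro a h; exact absurd rfl h
  | cons q rest' ih =>
    intro a _
    cases rest' with
    | nil => simp [pvB]
    | cons q2 rs =>
      rw [List.dropLast_cons_of_ne_nil (by simp), List.foldl_cons,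
        ih _ (by simp)]
      have hstep : (if q = [] ∨ (PySem.List.pyGetD q (-1) ' ' ≠ ' ' ∧ PySem.List.pyGetD q (-1) ' ' ≠ '=') then a + 1 else a)
          = a + (if pvGood (q.getLast?.or (some '(')) then 1 else 0) := by
        cases q with
        | nil => simp [pvGood]
        | cons x xs =>
          rw [PySem.List.pyGetD_neg_one (x :: xs) ' ' (by simp)]
          have hl : (x :: xs).getLast? = some ((x :: xs).getLast (by simp)) := by
            simp [List.getLast?_eq_some_getLast]
          rw [hl]
          by_cases h : (x :: xs).getLast (by simp) ≠ ' ' ∧ (x :: xs).getLast (by simp) ≠ '=' <;>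
            simp [pvGood, h]
      rw [hstep]
      simp [pvB]
      ring

-- ===== VERDICT (by name: the statement is the Claim_ definition above) =====
theorem num_of_invocations_spec : Claim_equal_num_of_invocations := by
  intro line _
  unfold Spec_num_of_invocations num_of_invocations num_of_invocations_alt
  have hA : (PySem.List.pyRange 0 (line.toList.length : Int) 1).foldl (fun inv i =>
      if PySem.List.pyGetD line.toList i ' ' = '(' then
        if i = 0 then inv
        else if PySem.List.pyGetD line.toList (i - 1) ' ' ≠ ' ' ∧ PySem.List.pyGetD line.toList (i - 1) ' ' ≠ '=' then
          inv + 1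
        else inv
      else inv) (0 : Int) = pvF none line.toList := by
    rw [pv_key line.toList line.toList.length le_rfl]
    rw [← pv_f_eq_pair]
    congr 1
    have : (line.toList.zip line.toList.tail).length = line.toList.length - 1 := by
      rcases line.toList with _ | ⟨c, cs⟩ <;> simp [List.length_zip]
    rw [List.take_of_length_le (by omega)]
  rw [hA, pv_split_key line.toList none]
  have hsplit : List.splitOn '(' line.toList = List.splitOnP (· == '(') line.toList := rfl
  rw [← hsplit]
  cases hP : List.splitOn '(' line.toList with
  | nil => exact absurd hP (List.splitOnP_ne_nil _ _)
  | cons q rest =>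
    cases rest with
    | nil => simp [pvB]
    | cons q2 rs =>
      have hlen : (q :: q2 :: rs).length ≠ 1 := by simp
      simp only [hlen, List.headD_cons]
      have hslice : PySem.List.slice (q :: q2 :: rs) (some 1) (some (-1))
          = (q2 :: rs).dropLast := by
        simp [PySem.List.slice, PySem.List.clampIdx]
        rw [if_neg (by omega), List.dropLast_eq_take]
        simp
      have hfirst : (if q ≠ [] ∧ PySem.List.pyGetD q (-1) ' ' ≠ ' ' ∧ PySem.List.pyGetD q (-1) ' ' ≠ '=' then (1 : Int) else 0)
          = (if pvGood (q.getLast?.or none) then 1 else 0) := by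
        cases q with
        | nil => simp [pvGood]
        | cons x xs =>
          rw [PySem.List.pyGetD_neg_one (x :: xs) ' ' (by simp)]
          have hl : (x :: xs).getLast? = some ((x :: xs).getLast (by simp)) := by
            simp [List.getLast?_eq_some_getLast]
          rw [hl]
          by_cases h : (x :: xs).getLast (by simp) ≠ ' ' ∧ (x :: xs).getLast (by simp) ≠ '=' <;>
            simp [pvGood, h]
      rw [hslice, pv_b_fold (q2 :: rs) _ (by simp), pvB_cons_cons, ← hfirst]
      simp
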